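-- pv_equiv track=rewrite | github.com/22Pickles/MidnightStrategyAnalysis | main.py | str3
-- ===== SOURCE A (Python) =====
-- def str3(roll, pocket):
--     s = []
--     if 1 not in pocket:
--         for i in range(len(roll)):
--             if roll[i] == 1:
--                 s.append(roll[i])
--                 break
--     if 4 not in pocket:
--         for i in range(len(roll)):
--             if roll[i] == 4:
--                 s.append(roll[i])
--                 break
--     for i in range(len(roll)):
--         if roll[i] == 6:
--             if len(roll) - len(s) < 4 and ((1 not in pocket) or (4 not in pocket)):
--                 break
--             else:
--                 s.append(roll[i])
--     if len(s) == 0: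
--         s.append(max(roll))
--     return s
-- ===== SOURCE B (Python) =====
-- def str3(roll, pocket):
--     s = []
--     if 1 not in pocket and 1 in roll:
--         s.append(1)
--     if 4 not in pocket and 4 in roll:
--         s.append(4)
--     c = roll.count(6)
--     if 1 in pocket and 4 in pocket:
--         s += [6] * c
--     else:
--         s += [6] * min(c, max(0, len(roll) - 3 - len(s)))
--     if not s:
--         s.append(max(roll))
--     return s
-- ===== Notes on version B (the rewrite author's own statement) =====
-- stated objective: simpler
-- what changed: Replaces A's three index loops (find-and-break for 1 and 4, and a stateful append/break loop over the 6s) with membership flags plus roll.count(6) and a closed-form cap min(c, max(0, len(roll)-3-len(s))) on how many sixes to keep.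
import Mathlib
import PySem

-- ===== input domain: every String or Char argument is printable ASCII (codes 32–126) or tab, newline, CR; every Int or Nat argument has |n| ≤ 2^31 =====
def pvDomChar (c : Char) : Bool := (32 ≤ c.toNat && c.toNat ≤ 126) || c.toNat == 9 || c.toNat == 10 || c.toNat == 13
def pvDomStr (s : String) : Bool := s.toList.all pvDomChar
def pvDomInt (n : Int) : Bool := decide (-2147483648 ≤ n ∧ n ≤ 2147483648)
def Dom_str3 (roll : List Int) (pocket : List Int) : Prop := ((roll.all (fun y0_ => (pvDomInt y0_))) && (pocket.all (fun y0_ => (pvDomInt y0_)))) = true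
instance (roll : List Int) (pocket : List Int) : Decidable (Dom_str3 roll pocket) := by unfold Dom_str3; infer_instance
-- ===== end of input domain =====

-- B replaces A's find-and-break loops and the stateful 6-loop by membership flags, roll.count(6)
-- and a closed-form cap; objective: simpler. Equivalence is about the return value.

-- ===== PORT A =====
-- 'for i in range(len(roll)): if roll[i] == v: s.append(roll[i]); break' starting from s = []
def str3FindBreak (l : List Int) (v : Int) : List Int :=
  match l with
  | [] => []
  | x :: xs => if x = v then [x] else str3FindBreak xs v

-- the third loop: appends each 6 unless the break condition fires, carrying s
def str3Loop6 (l : List Int) (n : Int) (p1 : Bool) (p4 : Bool) (s : List Int) : List Int :=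
  match l with
  | [] => s
  | x :: xs =>
    if x = 6 then
      if n - (s.length : Int) < 4 ∧ (p1 = false ∨ p4 = false) then s
      else str3Loop6 xs n p1 p4 (s ++ [x])
    else str3Loop6 xs n p1 p4 s

def str3 (roll : List Int) (pocket : List Int) : List Int :=
  let s0 : List Int := []
  let s1 := if pocket.contains 1 then s0 else s0 ++ str3FindBreak roll 1
  let s2 := if pocket.contains 4 then s1 else s1 ++ str3FindBreak roll 4
  let s3 := str3Loop6 roll (roll.length : Int) (pocket.contains 1) (pocket.contains 4) s2
  if s3.length = 0 then
    match PySem.List.max? roll (fun y => y) with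
    | some m => s3 ++ [m]
    | none => s3      -- max([]) raises ValueError in Python; excluded by Pre_str3
  else s3

-- ===== PORT B =====
def str3_alt (roll : List Int) (pocket : List Int) : List Int :=
  let s1 : List Int := if ¬ pocket.contains 1 ∧ roll.contains 1 then [1] else []
  let s2 := s1 ++ (if ¬ pocket.contains 4 ∧ roll.contains 4 then [4] else [])
  let c := PySem.List.count roll 6
  let s3 := s2 ++
    (if pocket.contains 1 ∧ pocket.contains 4 then List.replicate c 6
     else List.replicate (min (c : Int) (max 0 ((roll.length : Int) - 3 - (s2.length : Int)))).toNat 6)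
  if s3 = [] then
    match PySem.List.max? roll (fun y => y) with
    | some m => s3 ++ [m]
    | none => s3      -- max([]) raises here too; excluded by Pre_str3
  else s3

-- ===== PRECONDITION & SPEC =====
-- Pre_ excludes roll = [], on which both A and B reach max([]) and raise ValueError.
def Pre_str3 (roll : List Int) (pocket : List Int) : Prop := roll ≠ []
instance (roll : List Int) (pocket : List Int) : Decidable (Pre_str3 roll pocket) := by unfold Pre_str3; infer_instance
def pvWitness_str3 : List Int × List Int := ([6, 1, 6, 6], [4])

def Spec_str3 (roll : List Int) (pocket : List Int) (out : List Int) : Prop := out = str3_alt roll pocket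
instance (roll : List Int) (pocket : List Int) (out : List Int) : Decidable (Spec_str3 roll pocket out) := by unfold Spec_str3; infer_instance

-- ===== CLAIM =====
def Claim_equal_str3 : Prop := ∀ (roll : List Int) (pocket : List Int), Dom_str3 roll pocket → Pre_str3 roll pocket → Spec_str3 roll pocket (str3 roll pocket)

-- ===== LEMMAS AND PROOFS =====

theorem str3FindBreak_eq (l : List Int) (v : Int) :
    str3FindBreak l v = if l.contains v then [v] else [] := by
  induction l with
  | nil => simp [str3FindBreak]
  | cons x xs ih =>
    simp only [str3FindBreak, List.contains_cons]
    by_cases h : x = v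
    · simp [h]
    · simp [h, ih, Ne.symm h]

-- both flags set: the break condition never fires, every 6 is appended
theorem str3Loop6_all (l : List Int) (n : Int) (s : List Int) :
    str3Loop6 l n true true s = s ++ List.replicate (l.count 6) 6 := by
  induction l generalizing s with
  | nil => simp [str3Loop6]
  | cons x xs ih =>
    simp only [str3Loop6]
    split_ifs with h hb
    · exact absurd hb.2 (by simp)
    · subst h
      rw [ih]
      have : List.count 6 ((6 : Int) :: xs) = List.count 6 xs + 1 := by simp
      rw [this, List.append_assoc, List.replicate_succ]
      rfl
    · rw [ih]
      congr 2
      simp [List.count_cons, h]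

-- at least one flag unset: appends exactly min(count, max 0 (n - 3 - |s|)) sixes
theorem str3Loop6_cap (l : List Int) (n : Int) (p1 p4 : Bool) (hp : p1 = false ∨ p4 = false)
    (s : List Int) :
    str3Loop6 l n p1 p4 s =
      s ++ List.replicate (min (l.count 6 : Int) (max 0 (n - 3 - (s.length : Int)))).toNat 6 := by
  induction l generalizing s with
  | nil => simp [str3Loop6]
  | cons x xs ih =>
    simp only [str3Loop6]
    split_ifs with h hb
    · -- x = 6, break fires: n - |s| < 4, so the cap is 0
      subst h
      have hc : (0 : Int) ≤ ((6 :: xs).count 6 : Int) := Int.natCast_nonneg _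
      have h0 : (min (((6 :: xs).count 6 : Nat) : Int) (max 0 (n - 3 - (s.length : Int)))).toNat = 0 := by
        omega
      rw [h0]
      simp
    · -- x = 6, no break: append and recurse
      subst h
      rw [ih]
      have hge : ¬ (n - (s.length : Int) < 4) := fun hlt => hb ⟨hlt, hp⟩
      have hlen : (((s ++ [(6 : Int)]).length : Nat) : Int) = (s.length : Int) + 1 := by
        simp
      have hcnt : List.count 6 ((6 : Int) :: xs) = List.count 6 xs + 1 := by simp
      rw [hlen, hcnt, List.append_assoc]
      congr 1
      have hmin : (min ((List.count 6 xs + 1 : Nat) : Int) (max 0 (n - 3 - (s.length : Int)))).toNat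
          = (min ((List.count 6 xs : Nat) : Int) (max 0 (n - 3 - ((s.length : Int) + 1)))).toNat + 1 := by
        omega
      rw [hmin, List.replicate_succ]
      rfl
    · rw [ih]
      congr 2
      simp [List.count_cons, h]

-- ===== VERDICT =====
theorem str3_spec : Claim_equal_str3 := by
  intro roll pocket _hdom _hpre
  unfold Spec_str3 str3 str3_alt
  by_cases h1 : pocket.contains 1 = true <;> by_cases h4 : pocket.contains 4 = true
  · simp only [h1, h4]
    rw [str3Loop6_all]
    simp [h1, h4, PySem.List.count, List.length_eq_zero_iff]
  · have h4' : pocket.contains 4 = false := by simpa using h4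
    simp only [h1, h4']
    rw [str3Loop6_cap _ _ true false (Or.inr rfl)]
    by_cases hr4 : (4 : Int) ∈ roll <;>
      simp [h1, h4', hr4, str3FindBreak_eq, PySem.List.count, List.length_eq_zero_iff]
  · have h1' : pocket.contains 1 = false := by simpa using h1
    simp only [h1', h4]
    rw [str3Loop6_cap _ _ false true (Or.inl rfl)]
    by_cases hr1 : (1 : Int) ∈ roll <;>
      simp [h1', h4, hr1, str3FindBreak_eq, PySem.List.count, List.length_eq_zero_iff]
  · have h1' : pocket.contains 1 = false := by simpa using h1
    have h4' : pocket.contains 4 = false := by simpa using h4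
    simp only [h1', h4']
    rw [str3Loop6_cap _ _ false false (Or.inl rfl)]
    by_cases hr1 : (1 : Int) ∈ roll <;> by_cases hr4 : (4 : Int) ∈ roll <;>
      simp [h1', h4', hr1, hr4, str3FindBreak_eq, PySem.List.count, List.length_eq_zero_iff]
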